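-- pv_equiv track=rewrite | github.com/amirhajibabaei/AutoForce | theforce/analysis/atomsgen.py | canonical
-- ===== SOURCE A (Python) =====
-- def canonical(generator):
--     """
--     path independent, unique, and abstract representation of a generator.
--     """
--     status = {}
--     for k, i, f in generator:
--         if k in status:
--             assert status[k][1] == i
--             status[k] = (status[k][0], f)
--         else:
--             status[k] = (i, f)
--     return tuple((k, *status[k]) for k in sorted(status.keys()))
-- ===== SOURCE B (Python) =====
-- def canonical(generator):
--     """
--     path independent, unique, and abstract representation of a generator.
--     """
--     triples = sorted(generator, key=lambda t: t[0])
--     out = []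
--     n = len(triples)
--     j = 0
--     while j < n:
--         k, i, f = triples[j]
--         j += 1
--         while j < n and triples[j][0] == k:
--             assert f == triples[j][1]
--             f = triples[j][2]
--             j += 1
--         out.append((k, i, f))
--     return tuple(out)
-- ===== Notes on version B (the rewrite author's own statement) =====
-- stated objective: alternative
-- what changed: Replaced the dict accumulation (first-i kept, f overwritten per key, then sorted keys re-looked-up) by a sort-by-key-then-group linear scan that emits (key, first i, last f) per contiguous group; both raise AssertionError on the same chain-inconsistent inputs, which Pre_ excludes.
import Mathlib
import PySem

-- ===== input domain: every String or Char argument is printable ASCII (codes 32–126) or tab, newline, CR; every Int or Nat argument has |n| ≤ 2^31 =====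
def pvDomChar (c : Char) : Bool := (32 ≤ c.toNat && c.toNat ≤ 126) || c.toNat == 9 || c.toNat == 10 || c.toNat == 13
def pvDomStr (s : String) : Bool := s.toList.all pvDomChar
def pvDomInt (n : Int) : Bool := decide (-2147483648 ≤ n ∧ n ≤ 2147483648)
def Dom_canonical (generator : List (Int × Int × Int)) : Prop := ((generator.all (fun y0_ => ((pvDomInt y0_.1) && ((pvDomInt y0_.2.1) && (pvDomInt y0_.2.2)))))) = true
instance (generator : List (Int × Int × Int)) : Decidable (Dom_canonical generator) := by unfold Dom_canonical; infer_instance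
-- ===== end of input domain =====

-- B replaces A's dict accumulation + sorted-keys re-lookup by a stable sort on the key followed by a
-- single grouping scan emitting (key, first i, last f) per contiguous group (objective: alternative).

-- ===== PORT A =====
-- One loop step of A: the 'assert status[k][1] == i' raises exactly outside Pre_canonical, so it
-- contributes no value here; the 'status[k]' lookup is total because the key was just tested
-- present (the '.getD (0, 0)' default is never read).
def canonStep (status : PySem.Dict Int (Int × Int)) (t : Int × Int × Int) :
    PySem.Dict Int (Int × Int) :=
  if status.contains t.1 then
    status.insert t.1 (((status.get? t.1).getD (0, 0)).1, t.2.2)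
  else
    status.insert t.1 (t.2.1, t.2.2)

def canonical (generator : List (Int × Int × Int)) : List (Int × Int × Int) :=
  let status := generator.foldl canonStep PySem.Dict.empty
  (PySem.List.sorted status.keys (fun x => x) false).map
    (fun k => (k, ((status.get? k).getD (0, 0)).1, ((status.get? k).getD (0, 0)).2))

-- ===== PORT B =====
-- The inner while loop of Source B: consume the leading triples with key k, carrying f along; returns
-- the final f and the unconsumed suffix.  (Source B's assert raises exactly outside Pre_canonical, so
-- it contributes no value here.)
def scanGroup (k f : Int) : List (Int × Int × Int) → Int × List (Int × Int × Int)
  | [] => (f, [])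
  | u :: rest => if u.1 == k then scanGroup k u.2.2 rest else (f, u :: rest)

-- termination measure for emitGroups (cited by its decreasing_by)
lemma scanGroup_snd_length (k f : Int) (l : List (Int × Int × Int)) :
    (scanGroup k f l).2.length ≤ l.length := by
  induction l generalizing f with
  | nil => simp [scanGroup]
  | cons u rest ih =>
      simp only [scanGroup]
      split
      · exact (ih _).trans (Nat.le_succ _)
      · simp

-- The outer while loop of Source B over the sorted list.
def emitGroups : List (Int × Int × Int) → List (Int × Int × Int)
  | [] => []
  | t :: rest =>
      (t.1, t.2.1, (scanGroup t.1 t.2.2 rest).1) :: emitGroups (scanGroup t.1 t.2.2 rest).2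
termination_by l => l.length
decreasing_by exact Nat.lt_succ_of_le (scanGroup_snd_length _ _ _)

def canonical_alt (generator : List (Int × Int × Int)) : List (Int × Int × Int) :=
  emitGroups (PySem.List.sorted generator (fun t => t.1) false)

-- ===== PRECONDITION & SPEC =====
-- Pre_ excludes exactly the inputs on which Python A raises AssertionError (Python B raises it on
-- the same inputs): some key has a later occurrence whose i differs from the previous occurrence's f.
def Pre_canonical (generator : List (Int × Int × Int)) : Prop :=
  ∀ k ∈ generator.map (fun t => t.1),
    List.IsChain (fun t u => t.2.2 = u.2.1) (generator.filter (fun t => t.1 == k))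

instance (generator : List (Int × Int × Int)) : Decidable (Pre_canonical generator) := by
  unfold Pre_canonical; infer_instance

def pvWitness_canonical : (List (Int × Int × Int)) := [(1, 2, 3), (1, 3, 5), (0, 7, 7)]

def Spec_canonical (generator : List (Int × Int × Int)) (out : List (Int × Int × Int)) : Prop :=
  out = canonical_alt generator
instance (generator : List (Int × Int × Int)) (out : List (Int × Int × Int)) :
    Decidable (Spec_canonical generator out) := by unfold Spec_canonical; infer_instance

-- ===== CLAIM (what is proved, stated in full; the proofs are below) =====
def Claim_equal_canonical : Prop := ∀ (generator : List (Int × Int × Int)),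
  Dom_canonical generator → Pre_canonical generator →
  Spec_canonical generator (canonical generator)

-- ===== LEMMAS AND PROOFS =====

-- the occurrences of key k in g, in order; the first i / last f among them
def grpK (g : List (Int × Int × Int)) (k : Int) : List (Int × Int × Int) :=
  g.filter (fun t => t.1 == k)
def fstI (g : List (Int × Int × Int)) (k : Int) : Int :=
  match grpK g k with
  | [] => 0
  | t :: _ => t.2.1
def lstF (g : List (Int × Int × Int)) (k : Int) : Int :=
  ((grpK g k).getLastD (0, 0, 0)).2.2
def keyMap (g : List (Int × Int × Int)) : List Int := g.map (fun t => t.1)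

-- ---- A-side: the dict after the loop holds (first i, last f) per key ----

lemma get?_canonStep (d : PySem.Dict Int (Int × Int)) (t : Int × Int × Int) (k : Int) :
    (canonStep d t).get? k =
      if k = t.1 then
        some (match d.get? t.1 with
              | some v => (v.1, t.2.2)
              | none => (t.2.1, t.2.2))
      else d.get? k := by
  unfold canonStep
  rw [PySem.Dict.contains_eq_isSome_get?]
  cases h : d.get? t.1 with
  | none => simp [PySem.Dict.get?_insert]
  | some v => simp [PySem.Dict.get?_insert]

lemma foldl_canonStep_get? (g : List (Int × Int × Int)) (k : Int) :
    (g.foldl canonStep PySem.Dict.empty).get? k =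
      match grpK g k with
      | [] => none
      | _ :: _ => some (fstI g k, lstF g k) := by
  induction g using List.reverseRecOn with
  | nil => simp [grpK, PySem.Dict.get?_empty]
  | append_singleton xs t ih =>
      rw [List.foldl_append, List.foldl_cons, List.foldl_nil, get?_canonStep]
      have hg : ∀ j, grpK (xs ++ [t]) j = grpK xs j ++ if t.1 == j then [t] else [] := by
        intro j
        simp only [grpK, List.filter_append]
        congr 1
        split <;> simp_all
      by_cases hk : k = t.1
      · subst hk
        rw [if_pos rfl, ih]
        cases hgrp : grpK xs t.1 with
        | nil =>
            have h1 : grpK (xs ++ [t]) t.1 = [t] := by rw [hg, hgrp]; simp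
            simp [fstI, lstF, h1]
        | cons a as =>
            have h1 : grpK (xs ++ [t]) t.1 = (a :: as) ++ [t] := by rw [hg, hgrp]; simp
            simp only [fstI, lstF, hgrp, h1]
            have hlast : ((a :: as) ++ [t]).getLastD (0, 0, 0) = t := by
              rw [List.getLastD_eq_getLast?, List.getLast?_concat]; rfl
            rw [hlast]
            rfl
      · rw [if_neg hk, ih]
        have hbk : (t.1 == k) = false := by simp; omega
        have h1 : grpK (xs ++ [t]) k = grpK xs k := by rw [hg, hbk]; simp
        simp only [fstI, lstF, h1]

lemma canonStep_eq : canonStep = fun status t =>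
    status.insert t.1 (if status.contains t.1
      then (((status.get? t.1).getD (0, 0)).1, t.2.2) else (t.2.1, t.2.2)) := by
  funext status t
  simp only [canonStep]
  split <;> rfl

lemma foldl_canonStep_keys (g : List (Int × Int × Int)) :
    (g.foldl canonStep PySem.Dict.empty).keys = PySem.Set.ofList (keyMap g) := by
  rw [canonStep_eq, PySem.Dict.keys_foldl_insert_key]
  simp [keyMap, PySem.Set.update_nil_left, PySem.Dict.keys_empty]

lemma canonical_eq (g : List (Int × Int × Int)) :
    canonical g = (PySem.List.sorted (PySem.Set.ofList (keyMap g)) (fun x => x) false).map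
      (fun k => (k, fstI g k, lstF g k)) := by
  unfold canonical
  show (PySem.List.sorted (g.foldl canonStep PySem.Dict.empty).keys (fun x => x) false).map _ = _
  rw [foldl_canonStep_keys]
  apply List.map_congr_left
  intro k hk
  have hk2 : k ∈ keyMap g := by
    have := (PySem.List.mem_sorted _ _ _ _).1 hk
    exact (PySem.Set.mem_ofList _ _).1 this
  obtain ⟨t, ht, hteq⟩ := List.mem_map.1 hk2
  have hne : grpK g k ≠ [] := by
    intro hnil
    have : t ∈ grpK g k := by
      simp [grpK, List.mem_filter, ht, hteq]
    rw [hnil] at this; exact absurd this (List.not_mem_nil)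
  cases hgrp : grpK g k with
  | nil => exact absurd hgrp hne
  | cons a as =>
      rw [foldl_canonStep_get?, hgrp]
      rfl

-- ---- stability: the per-key occurrence lists survive the sort unchanged ----

lemma filter_insertBy (x : Int × Int × Int) (k : Int) (ys : List (Int × Int × Int))
    (hys : ys.Pairwise (fun a b => a.1 ≤ b.1)) :
    (PySem.List.insertBy (fun a b => decide (a.1 < b.1)) x ys).filter (fun t => t.1 == k)
      = ys.filter (fun t => t.1 == k) ++ if x.1 == k then [x] else [] := by
  induction ys with
  | nil => cases hx : (x.1 == k) <;> simp [PySem.List.insertBy, hx]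
  | cons y ys ih =>
      simp only [PySem.List.insertBy]
      by_cases hlt : x.1 < y.1
      · rw [if_pos (by simpa using hlt)]
        by_cases hxk : x.1 = k
        · have hx : (x.1 == k) = true := by simp [hxk]
          have hemp : (y :: ys).filter (fun t => t.1 == k) = [] := by
            rw [List.filter_eq_nil_iff]
            intro a ha
            have hya : y.1 ≤ a.1 := by
              rcases ha with _ | ha
              · exact le_refl _
              · exact List.rel_of_pairwise_cons hys (by assumption)
            simp only [beq_iff_eq]
            omega
          rw [List.filter_cons, if_pos hx, hemp]
          simp [hx]
        · have hx : (x.1 == k) = false := by simp [hxk]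
          rw [List.filter_cons, if_neg (by simp [hx])]
          simp [hx]
      · rw [if_neg (by simpa using hlt)]
        rw [List.filter_cons, List.filter_cons, ih (List.Pairwise.of_cons hys)]
        split <;> simp

lemma sorted_append_singleton (xs : List (Int × Int × Int)) (x : Int × Int × Int) :
    PySem.List.sorted (xs ++ [x]) (fun t => t.1) false
      = PySem.List.insertBy (fun a b => decide (a.1 < b.1)) x
          (PySem.List.sorted xs (fun t => t.1) false) := by
  rw [PySem.List.sorted_eq_foldl_insertBy, PySem.List.sorted_eq_foldl_insertBy,
    List.foldl_append, List.foldl_cons, List.foldl_nil]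

lemma grpK_sorted (g : List (Int × Int × Int)) (k : Int) :
    grpK (PySem.List.sorted g (fun t => t.1) false) k = grpK g k := by
  induction g using List.reverseRecOn with
  | nil => rfl
  | append_singleton xs x ih =>
      unfold grpK
      rw [sorted_append_singleton,
        filter_insertBy _ _ _ (PySem.List.sorted_pairwise xs (fun t => t.1)),
        List.filter_append]
      unfold grpK at ih
      rw [ih]
      congr 1
      cases hx : (x.1 == k) <;> simp [hx]

-- ---- the sorted distinct keys of g are the distinct keys of the sorted list ----

lemma ofList_sublist (l : List Int) : List.Sublist (PySem.Set.ofList l) l := by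
  induction l using List.reverseRecOn with
  | nil => simp [PySem.Set.ofList]
  | append_singleton xs x ih =>
      rw [PySem.Set.ofList_append_singleton, PySem.Set.add_eq_ite]
      split
      · exact ih.trans (List.sublist_append_left xs [x])
      · exact List.Sublist.append ih (List.Sublist.refl [x])

lemma sortedKeys_eq (g : List (Int × Int × Int)) :
    PySem.List.sorted (PySem.Set.ofList (keyMap g)) (fun x => x) false
      = PySem.Set.ofList (keyMap (PySem.List.sorted g (fun t => t.1) false)) := by
  set s := PySem.List.sorted g (fun t => t.1) false with hs
  apply PySem.List.sorted_eq_of_perm_of_pairwise_lt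
  · apply (List.perm_ext_iff_of_nodup (PySem.Set.nodup_ofList _) (PySem.Set.nodup_ofList _)).2
    intro a
    rw [PySem.Set.mem_ofList, PySem.Set.mem_ofList]
    unfold keyMap
    simp only [List.mem_map]
    constructor
    · rintro ⟨t, ht, rfl⟩
      exact ⟨t, (PySem.List.mem_sorted _ _ _ _).1 ht, rfl⟩
    · rintro ⟨t, ht, rfl⟩
      exact ⟨t, (PySem.List.mem_sorted _ _ _ _).2 ht, rfl⟩
  · have hle : (keyMap s).Pairwise (· ≤ ·) := by
      unfold keyMap
      exact PySem.List.sorted_map_key_pairwise g (fun t => t.1)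
    have hsub := ofList_sublist (keyMap s)
    have hle2 : (PySem.Set.ofList (keyMap s)).Pairwise (· ≤ ·) := hle.sublist hsub
    have hnd : (PySem.Set.ofList (keyMap s)).Pairwise (· ≠ ·) := PySem.Set.nodup_ofList _
    exact (hle2.and hnd).imp (fun ⟨h1, h2⟩ => lt_of_le_of_ne h1 h2)

-- ---- B-side: the grouping scan over a key-sorted list computes the same per-key summary ----

lemma discard_eq_filter (s : List Int) (x : Int) :
    PySem.Set.discard s x = s.filter (fun y => !(y == x)) := by
  simp only [PySem.Set.discard]

lemma discard_of_forall_ne (s : List Int) (x : Int) (h : ∀ y ∈ s, y ≠ x) :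
    PySem.Set.discard s x = s := by
  rw [discard_eq_filter, List.filter_eq_self]
  intro y hy
  simp [h y hy]

lemma discard_ofList_append (A B : List Int) (x : Int)
    (hA : ∀ a ∈ A, a = x) (hB : ∀ b ∈ B, b ≠ x) :
    PySem.Set.discard (PySem.Set.ofList (A ++ B)) x = PySem.Set.ofList B := by
  induction A with
  | nil =>
      rw [List.nil_append]
      apply discard_of_forall_ne
      intro y hy
      exact hB y ((PySem.Set.mem_ofList _ _).1 hy)
  | cons a A' ih =>
      have hax : a = x := hA a (by simp)
      subst hax
      rw [List.cons_append, PySem.Set.ofList_cons]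
      rw [discard_eq_filter, List.filter_cons]
      simp only [BEq.rfl, Bool.not_true]
      rw [← discard_eq_filter, discard_eq_filter, discard_eq_filter, List.filter_filter]
      simp only [Bool.and_self]
      rw [← discard_eq_filter]
      exact ih (fun a ha => hA a (by simp [ha]))

lemma dropWhile_head_false {α : Type} (p : α → Bool) (l : List α) (r : α) (R : List α)
    (h : l.dropWhile p = r :: R) : p r = false := by
  induction l with
  | nil => simp at h
  | cons a t ih =>
      rw [List.dropWhile_cons] at h
      split at h
      · exact ih h
      · cases h; simp_all

lemma getLastD_map (f : (Int × Int × Int) → Int) (a : Int × Int × Int)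
    (l : List (Int × Int × Int)) : (l.map f).getLastD (f a) = f (l.getLastD a) := by
  induction l generalizing a with
  | nil => rfl
  | cons b t ih => simp only [List.map_cons, List.getLastD_cons, ih]

lemma scanGroup_eq (k f : Int) (l : List (Int × Int × Int)) :
    scanGroup k f l =
      (((l.takeWhile (fun u => u.1 == k)).map (fun u => u.2.2)).getLastD f,
        l.dropWhile (fun u => u.1 == k)) := by
  induction l generalizing f with
  | nil => rfl
  | cons u rest ih =>
      simp only [scanGroup, List.takeWhile_cons, List.dropWhile_cons]
      by_cases h : u.1 == k
      · simp only [h, ih, if_true, List.map_cons, List.getLastD_cons]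
      · simp [h]

lemma emitGroups_eq (s : List (Int × Int × Int)) (hs : s.Pairwise (fun a b => a.1 ≤ b.1)) :
    emitGroups s = (PySem.Set.ofList (keyMap s)).map (fun k => (k, fstI s k, lstF s k)) := by
  induction s using emitGroups.induct with
  | case1 => simp [emitGroups, keyMap, PySem.Set.ofList]
  | case2 t rest ih =>
      have hGdef : (scanGroup t.1 t.2.2 rest).2 = rest.dropWhile (fun u => u.1 == t.1) := by
        rw [scanGroup_eq]
      set G := rest.takeWhile (fun u => u.1 == t.1) with hGdef2
      set R := rest.dropWhile (fun u => u.1 == t.1) with hRdef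
      have hsplit : rest = G ++ R := (List.takeWhile_append_dropWhile).symm
      have hG : ∀ u ∈ G, u.1 = t.1 := by
        intro u hu
        have := List.mem_takeWhile_imp hu
        simpa using this
      have hR : ∀ u ∈ R, t.1 < u.1 := by
        intro u hu
        cases hR0 : R with
        | nil => rw [hR0] at hu; simp at hu
        | cons r R' =>
            have hpr : (r.1 == t.1) = false := dropWhile_head_false _ rest r R' (by rw [← hRdef, hR0])
            have htle : ∀ v ∈ rest, t.1 ≤ v.1 := fun v hv => List.rel_of_pairwise_cons hs hv
            have hRsub : List.Sublist R rest := List.dropWhile_sublist _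
            have hRpair : R.Pairwise (fun a b => a.1 ≤ b.1) := (List.Pairwise.of_cons hs).sublist hRsub
            have htler : t.1 ≤ r.1 := htle r (hRsub.subset (by rw [hR0]; simp))
            have htltr : t.1 < r.1 := lt_of_le_of_ne htler (by intro h; simp [← h] at hpr)
            rw [hR0] at hu
            rcases hu with _ | hu'
            · exact htltr
            · have hp' : (r :: R').Pairwise (fun a b => a.1 ≤ b.1) := hR0 ▸ hRpair
              have : r.1 ≤ u.1 := List.rel_of_pairwise_cons hp' (by assumption)
              omega
      have hRne : ∀ b ∈ keyMap R, b ≠ t.1 := by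
        intro b hb
        obtain ⟨u, hu, rfl⟩ := List.mem_map.1 hb
        have := hR u hu
        omega
      have hkeys : PySem.Set.ofList (keyMap (t :: rest)) = t.1 :: PySem.Set.ofList (keyMap R) := by
        have : keyMap (t :: rest) = t.1 :: (keyMap G ++ keyMap R) := by
          simp only [keyMap, hsplit, List.map_cons, List.map_append]
        rw [this, PySem.Set.ofList_cons]
        congr 1
        apply discard_ofList_append
        · intro a ha
          obtain ⟨u, hu, rfl⟩ := List.mem_map.1 ha
          exact hG u hu
        · exact hRne
      have hfilG : G.filter (fun u => u.1 == t.1) = G := by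
        rw [List.filter_eq_self]
        intro u hu; simp [hG u hu]
      have hfilR : R.filter (fun u => u.1 == t.1) = [] := by
        rw [List.filter_eq_nil_iff]
        intro u hu
        have := hR u hu
        simp; omega
      have hgrp_t : grpK (t :: rest) t.1 = t :: G := by
        simp only [grpK, List.filter_cons, BEq.rfl, if_true, hsplit, List.filter_append, hfilG, hfilR,
          List.append_nil]
      have hlast : lstF (t :: rest) t.1 = (G.map (fun u => u.2.2)).getLastD t.2.2 := by
        rw [lstF, hgrp_t, List.getLastD_cons, getLastD_map (fun u => u.2.2) t G]
      have hother : ∀ k ∈ PySem.Set.ofList (keyMap R), grpK (t :: rest) k = grpK R k := by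
        intro k hk
        have hkne : k ≠ t.1 := hRne k ((PySem.Set.mem_ofList _ _).1 hk)
        have h1 : (t.1 == k) = false := by simp; omega
        have h2 : G.filter (fun u => u.1 == k) = [] := by
          rw [List.filter_eq_nil_iff]
          intro u hu
          have := hG u hu
          simp; omega
        simp [grpK, h1, hsplit, List.filter_append, h2]
      rw [emitGroups]
      rw [hkeys, List.map_cons]
      congr 1
      · rw [scanGroup_eq]
        simp only [← hGdef2]
        rw [← hlast]
        have hfst : fstI (t :: rest) t.1 = t.2.1 := by rw [fstI, hgrp_t]
        rw [hfst]
      · rw [hGdef]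
        have hRpair : R.Pairwise (fun a b => a.1 ≤ b.1) :=
          (List.Pairwise.of_cons hs).sublist (List.dropWhile_sublist _)
        rw [hGdef] at ih
        rw [ih hRpair]
        apply List.map_congr_left
        intro k hk
        simp only [fstI, lstF, hother k hk]

-- ===== VERDICT (by name: the statement is the Claim_ definition above) =====
theorem canonical_spec : Claim_equal_canonical := by
  intro g _ _
  unfold Spec_canonical canonical_alt
  rw [canonical_eq, sortedKeys_eq, emitGroups_eq _ (PySem.List.sorted_pairwise g (fun t => t.1))]
  apply List.map_congr_left
  intro k _
  simp only [fstI, lstF, grpK_sorted]
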